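-- pv_equiv track=rewrite | github.com/marmik28/Shopify-eng-intern-challenge | python/translator.py | check_braille
-- ===== SOURCE A (Python) =====
-- brailletoalpha = {
--     "O....." : "a", "O.O..." : "b", "OO...." : "c", "OO.O.." : "d", "O..O.." : "e",
--     "OOO..." : "f", "OOOO.." : "g", "O.OO.." : "h", ".OO..." : "i", ".OOO.." : "j",
--     "O...O." : "k", "O.O.O." : "l", "OO..O." : "m", "OO.OO." : "n", "O..OO." : "o",
--     "OOO.O." : "p", "OOOOO." : "q", "O.OOO." : "r", ".OO.O." : "s", ".OOOO." : "t",
--     "O...OO" : "u", "O.O.OO" : "v", ".OOO.O" : "w", "OO..OO" : "x", "OO.OOO" : "y",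
--     "O..OOO" : "z", "......" : " ", ".....O" : "cap"
--
-- }
--
-- brailetodigits = {
--     ".OOO.." : "0", "O....." : "1", "O.O..." : "2", "OO...." : "3", "OO.O.." : "4",
--     "O..O.." : "5", "OOO..." : "6", "OOOO.." : "7", "O.OO.." : "8", ".OO..." : "9",
--     "......" : " ", ".O.OOO" : "number follows"
-- }
--
-- def check_braille(s):
--     if len(s) % 6 != 0:
--         return False
--     for i in range(0, len(s), 6):
--         str = s[i:i+6]
--         if s[i:i+6] not in brailletoalpha and s[i:i+6] not in brailetodigits:
--             return False
--     return True
-- ===== SOURCE B (Python) =====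
-- # Single-pass character DFA: track the current partial cell and reject as soon
-- # as it stops being a prefix of any valid braille cell; no length%6 guard, no slicing.
--
-- _CELLS = [
--     "O.....", "O.O...", "OO....", "OO.O..", "O..O..", "OOO...", "OOOO..",
--     "O.OO..", ".OO...", ".OOO..", "O...O.", "O.O.O.", "OO..O.", "OO.OO.",
--     "O..OO.", "OOO.O.", "OOOOO.", "O.OOO.", ".OO.O.", ".OOOO.", "O...OO",
--     "O.O.OO", ".OOO.O", "OO..OO", "OO.OOO", "O..OOO", "......", ".....O",
--     ".O.OOO",
-- ]
--
-- _PREFIXES = frozenset(c[:k] for c in _CELLS for k in range(1, 7))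
--
-- def check_braille(s):
--     cur = ""
--     for ch in s:
--         cur += ch
--         if cur not in _PREFIXES:
--             return False
--         if len(cur) == 6:
--             cur = ""
--     return cur == ""
-- ===== Notes on version B (the rewrite author's own statement) =====
-- stated objective: alternative
-- what changed: Replaces the len%6 guard plus 6-character slicing loop over two dict memberships by a single character-by-character scan that accumulates the current partial cell and rejects as soon as it is no longer a prefix of any valid cell (a precomputed prefix set of the union of both key sets).
import Mathlib
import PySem

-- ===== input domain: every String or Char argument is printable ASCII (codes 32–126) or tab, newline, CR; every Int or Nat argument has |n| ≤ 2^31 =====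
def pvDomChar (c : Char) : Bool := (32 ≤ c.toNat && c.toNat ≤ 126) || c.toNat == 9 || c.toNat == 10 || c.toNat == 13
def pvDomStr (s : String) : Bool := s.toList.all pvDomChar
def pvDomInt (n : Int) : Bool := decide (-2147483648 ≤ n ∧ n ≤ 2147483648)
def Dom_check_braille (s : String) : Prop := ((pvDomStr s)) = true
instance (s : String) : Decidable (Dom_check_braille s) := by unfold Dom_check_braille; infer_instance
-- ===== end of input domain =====

-- B replaces A's len%6 guard plus 6-char-slice loop by a single character-by-character
-- scan that tracks the current partial cell and rejects as soon as it is no longer a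
-- prefix of any valid cell (objective: alternative — a one-pass DFA, no slicing).

-- ===== PORT A =====
def brailletoalpha : PySem.Dict (List Char) (List Char) := PySem.Dict.ofList
  [ ("O.....".toList, "a".toList), ("O.O...".toList, "b".toList), ("OO....".toList, "c".toList),
    ("OO.O..".toList, "d".toList), ("O..O..".toList, "e".toList), ("OOO...".toList, "f".toList),
    ("OOOO..".toList, "g".toList), ("O.OO..".toList, "h".toList), (".OO...".toList, "i".toList),
    (".OOO..".toList, "j".toList), ("O...O.".toList, "k".toList), ("O.O.O.".toList, "l".toList),
    ("OO..O.".toList, "m".toList), ("OO.OO.".toList, "n".toList), ("O..OO.".toList, "o".toList),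
    ("OOO.O.".toList, "p".toList), ("OOOOO.".toList, "q".toList), ("O.OOO.".toList, "r".toList),
    (".OO.O.".toList, "s".toList), (".OOOO.".toList, "t".toList), ("O...OO".toList, "u".toList),
    ("O.O.OO".toList, "v".toList), (".OOO.O".toList, "w".toList), ("OO..OO".toList, "x".toList),
    ("OO.OOO".toList, "y".toList), ("O..OOO".toList, "z".toList), ("......".toList, " ".toList),
    (".....O".toList, "cap".toList) ]

def brailetodigits : PySem.Dict (List Char) (List Char) := PySem.Dict.ofList
  [ (".OOO..".toList, "0".toList), ("O.....".toList, "1".toList), ("O.O...".toList, "2".toList),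
    ("OO....".toList, "3".toList), ("OO.O..".toList, "4".toList), ("O..O..".toList, "5".toList),
    ("OOO...".toList, "6".toList), ("OOOO..".toList, "7".toList), ("O.OO..".toList, "8".toList),
    (".OO...".toList, "9".toList), ("......".toList, " ".toList), (".O.OOO".toList, "number follows".toList) ]

-- the 'for i in range(0, len(s), 6): … return False' loop, as recursion over the index list
def pvLoopA (cs : List Char) : List Int → Bool
  | [] => true
  | i :: rest =>
    let _str := PySem.List.slice cs (some i) (some (i + 6))
    if !(brailletoalpha.contains (PySem.List.slice cs (some i) (some (i + 6)))) &&
       !(brailetodigits.contains (PySem.List.slice cs (some i) (some (i + 6)))) then false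
    else pvLoopA cs rest

def check_braille (s : String) : Bool :=
  if PySem.Int.mod (PySem.Str.len s) 6 ≠ 0 then false
  else pvLoopA s.toList (PySem.List.pyRange 0 (PySem.Str.len s) 6)

-- ===== PORT B =====
def pvCells : List (List Char) :=
  [ "O.....".toList, "O.O...".toList, "OO....".toList, "OO.O..".toList, "O..O..".toList,
    "OOO...".toList, "OOOO..".toList, "O.OO..".toList, ".OO...".toList, ".OOO..".toList,
    "O...O.".toList, "O.O.O.".toList, "OO..O.".toList, "OO.OO.".toList, "O..OO.".toList,
    "OOO.O.".toList, "OOOOO.".toList, "O.OOO.".toList, ".OO.O.".toList, ".OOOO.".toList,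
    "O...OO".toList, "O.O.OO".toList, ".OOO.O".toList, "OO..OO".toList, "OO.OOO".toList,
    "O..OOO".toList, "......".toList, ".....O".toList, ".O.OOO".toList ]

-- _PREFIXES = frozenset(c[:k] for c in _CELLS for k in range(1, 7))
def pvPrefixes : List (List Char) :=
  PySem.Set.ofList (pvCells.flatMap (fun c =>
    (PySem.List.pyRange 1 7 1).map (fun k => PySem.List.slice c none (some k))))

-- the 'for ch in s' scan with accumulator cur
def pvAltLoop : List Char → List Char → Bool
  | [], cur => cur == []
  | ch :: rest, cur =>
    let cur' := cur ++ [ch]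
    if !(pvPrefixes.contains cur') then false
    else if cur'.length == 6 then pvAltLoop rest []
    else pvAltLoop rest cur'

def check_braille_alt (s : String) : Bool := pvAltLoop s.toList []

-- ===== PRECONDITION & SPEC =====
def Spec_check_braille (s : String) (out : Bool) : Prop := out = check_braille_alt s
instance (s : String) (out : Bool) : Decidable (Spec_check_braille s out) := by unfold Spec_check_braille; infer_instance

-- ===== CLAIM (what is proved, stated in full; the proofs are below) =====
def Claim_equal_check_braille : Prop := ∀ (s : String), Dom_check_braille s → Spec_check_braille s (check_braille s)

-- ===== LEMMAS AND PROOFS =====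

-- chunk-wise reference form used to bridge the two loops
def pvChunks : Nat → List Char → Bool
  | 0, _ => true
  | m + 1, t => pvCells.contains (t.take 6) && pvChunks m (t.drop 6)

-- finite facts about the literal tables, decided once
theorem pv_keys_sub_cells : ∀ a ∈ brailletoalpha.keys, a ∈ pvCells := by decide
theorem pv_dkeys_sub_cells : ∀ a ∈ brailetodigits.keys, a ∈ pvCells := by decide
theorem pv_cells_sub_keys : ∀ a ∈ pvCells, a ∈ brailletoalpha.keys ∨ a ∈ brailetodigits.keys := by decide
set_option maxRecDepth 8192 in
theorem pv_pref_len6 : ∀ p ∈ pvPrefixes, p.length = 6 → p ∈ pvCells := by decide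
set_option maxRecDepth 8192 in
theorem pv_cell_prefixes : ∀ c ∈ pvCells,
    c.take 1 ∈ pvPrefixes ∧ c.take 2 ∈ pvPrefixes ∧ c.take 3 ∈ pvPrefixes ∧
    c.take 4 ∈ pvPrefixes ∧ c.take 5 ∈ pvPrefixes ∧ c.take 6 ∈ pvPrefixes := by decide

-- A's "not in alpha and not in digits" test is the complement of membership in pvCells
theorem pv_contains_union (x : List Char) :
    (brailletoalpha.contains x || brailetodigits.contains x) = pvCells.contains x := by
  rw [PySem.Dict.contains_eq_decide_mem_keys, PySem.Dict.contains_eq_decide_mem_keys,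
      List.contains_eq_mem]
  by_cases h : x ∈ pvCells
  · rcases pv_cells_sub_keys x h with h' | h' <;> simp [h, h']
  · have h1 : x ∉ brailletoalpha.keys := fun hm => h (pv_keys_sub_cells x hm)
    have h2 : x ∉ brailetodigits.keys := fun hm => h (pv_dkeys_sub_cells x hm)
    simp [h, h1, h2]

theorem pv_alt_end (cs : List Char) : ∀ cur : List Char, cur ≠ [] →
    cur.length + cs.length < 6 → pvAltLoop cs cur = false := by
  induction cs with
  | nil => intro cur hne _; simp [pvAltLoop, hne]
  | cons c rest ih =>
    intro cur hne hlen
    simp only [List.length_cons] at hlen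
    simp only [pvAltLoop]
    split_ifs with h1 h2
    · rfl
    · exfalso
      simp only [List.length_append, List.length_cons, List.length_nil, beq_iff_eq] at h2
      omega
    · exact ih (cur ++ [c]) (by simp)
        (by simp only [List.length_append, List.length_cons, List.length_nil]; omega)

theorem pv_alt_step (c1 c2 c3 c4 c5 c6 : Char) (rest : List Char) :
    pvAltLoop (c1 :: c2 :: c3 :: c4 :: c5 :: c6 :: rest) [] =
      (pvCells.contains [c1, c2, c3, c4, c5, c6] && pvAltLoop rest []) := by
  by_cases hm : [c1, c2, c3, c4, c5, c6] ∈ pvCells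
  · obtain ⟨p1, p2, p3, p4, p5, p6⟩ := pv_cell_prefixes _ hm
    simp only [List.take] at p1 p2 p3 p4 p5 p6
    simp [pvAltLoop, List.contains_eq_mem, p1, p2, p3, p4, p5, p6, hm]
  · rw [List.contains_eq_mem]
    simp only [hm, decide_false, Bool.false_and]
    simp [pvAltLoop]
    intro _ _ _ _ _ h6
    exact absurd (pv_pref_len6 _ h6 rfl) hm

theorem pv_alt_short (cs : List Char) (hne : cs ≠ []) (hlt : cs.length < 6) :
    pvAltLoop cs [] = false := by
  cases cs with
  | nil => exact absurd rfl hne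
  | cons c rest =>
    simp only [List.length_cons] at hlt
    simp only [pvAltLoop, List.nil_append]
    split_ifs with h1 h2
    · rfl
    · exfalso; simp at h2
    · exact pv_alt_end rest [c] (by simp) (by simp only [List.length_cons, List.length_nil]; omega)

theorem pv_alt_nonmult (n : Nat) : ∀ cs : List Char, cs.length = n → cs.length % 6 ≠ 0 →
    pvAltLoop cs [] = false := by
  induction n using Nat.strong_induction_on with
  | _ n ih =>
    intro cs hn hmod
    by_cases hlt : cs.length < 6
    · exact pv_alt_short cs (by rintro rfl; simp at hmod) hlt
    · rcases cs with _ | ⟨c1, _ | ⟨c2, _ | ⟨c3, _ | ⟨c4, _ | ⟨c5, _ | ⟨c6, rest⟩⟩⟩⟩⟩⟩ <;>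
        simp only [List.length_nil, List.length_cons] at hlt hn hmod <;> try omega
      rw [pv_alt_step]
      have : pvAltLoop rest [] = false := by
        refine ih rest.length (by omega) rest rfl ?_
        omega
      simp [this]

theorem pv_loopA_eq (m : Nat) : ∀ (j : Nat) (cs : List Char),
    pvLoopA cs ((List.range m).map (fun k : Nat => ((j : Int) + 6 * (k : Int)))) =
      pvChunks m (cs.drop j) := by
  induction m with
  | zero => intro j cs; simp [pvLoopA, pvChunks]
  | succ m ih =>
    intro j cs
    simp only [List.range_succ_eq_map, List.map_cons, List.map_map]
    have hslice : PySem.List.slice cs (some ((j : Int) + 6 * ((0 : Nat) : Int)))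
        (some ((j : Int) + 6 * ((0 : Nat) : Int) + 6)) = (cs.drop j).take 6 := by
      have h0 : ((j : Int) + 6 * ((0 : Nat) : Int)) = (j : Int) := by push_cast; ring
      rw [h0, PySem.List.slice_toNat cs (by positivity) (by positivity)]
      have h1 : ((j : Int) + 6).toNat = j + 6 := by omega
      have h2 : ((j : Int)).toNat = j := by omega
      rw [h1, h2]
      congr 1
      omega
    simp only [pvLoopA, hslice]
    have hcond : (!(brailletoalpha.contains ((cs.drop j).take 6)) &&
        !(brailetodigits.contains ((cs.drop j).take 6))) =
        !(pvCells.contains ((cs.drop j).take 6)) := by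
      rw [← pv_contains_union]; simp [Bool.not_or]
    have htail : (List.map ((fun k : Nat => (j : Int) + 6 * (k : Int)) ∘ Nat.succ) (List.range m)) =
        (List.range m).map (fun k : Nat => (((j + 6 : Nat) : Int) + 6 * (k : Int))) := by
      apply List.map_congr_left
      intro k _
      simp only [Function.comp]
      push_cast; ring
    rw [hcond, htail, ih (j + 6) cs]
    have hdd : (cs.drop j).drop 6 = cs.drop (j + 6) := by
      rw [List.drop_drop, Nat.add_comm]
    simp only [pvChunks, hdd, List.contains_eq_mem]
    by_cases hc : (cs.drop j).take 6 ∈ pvCells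
    · simp [hc]
    · simp [hc]

theorem pv_chunks_eq_alt (m : Nat) : ∀ cs : List Char, cs.length = 6 * m →
    pvChunks m cs = pvAltLoop cs [] := by
  induction m with
  | zero =>
    intro cs h
    have : cs = [] := List.eq_nil_of_length_eq_zero (by omega)
    subst this; simp [pvChunks, pvAltLoop]
  | succ m ih =>
    intro cs h
    rcases cs with _ | ⟨c1, _ | ⟨c2, _ | ⟨c3, _ | ⟨c4, _ | ⟨c5, _ | ⟨c6, rest⟩⟩⟩⟩⟩⟩ <;>
      simp only [List.length_nil, List.length_cons] at h <;> try omega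
    rw [pv_alt_step]
    simp only [pvChunks, List.take, List.drop]
    rw [ih rest (by omega)]

-- ===== VERDICT (by name: the statement is the Claim_ definition above) =====
theorem check_braille_spec : Claim_equal_check_braille := by
  intro s _dom
  unfold Spec_check_braille check_braille check_braille_alt
  have hlen : PySem.Str.len s = (s.toList.length : Int) := by simp
  rw [hlen, PySem.Int.mod_eq_emod_of_pos (by norm_num : (0:Int) < 6)]
  by_cases hmod : s.toList.length % 6 = 0
  · have hmodInt : ((s.toList.length : Int) % 6 = 0) := by omega
    rw [if_neg (by omega)]
    obtain ⟨m, hm⟩ : ∃ m, s.toList.length = 6 * m := ⟨s.toList.length / 6, by omega⟩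
    have hcount : (if (0:Int) < (s.toList.length : Int) then
        (((s.toList.length : Int) - 0 + 6 - 1) / 6).toNat else 0) = m := by
      by_cases h0 : m = 0
      · subst h0
        simp only [Nat.mul_zero] at hm
        rw [if_neg (by rw [hm]; simp)]
      · rw [if_pos (by push_cast [hm]; omega), hm]; push_cast; omega
    have hrange : PySem.List.pyRange 0 (s.toList.length : Int) 6 =
        (List.range m).map (fun k : Nat => ((0 : Nat) : Int) + 6 * (k : Int)) := by
      rw [PySem.List.pyRange_of_pos 0 _ (by norm_num), hcount]
      exact List.map_congr_left fun k _ => by push_cast; ring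
    rw [hrange, pv_loopA_eq m 0 s.toList]
    simpa using pv_chunks_eq_alt m s.toList hm
  · rw [if_pos (by omega)]
    exact (pv_alt_nonmult s.toList.length s.toList rfl hmod).symm
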